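-- pv_equiv track=rewrite | github.com/coldbeeen/cote_study | programmers/신고 결과 받기_sungwoo.py | solution
-- ===== SOURCE A (Python) =====
-- from collections import defaultdict
--
-- def solution(id_list, report, k):
--
--     # 유저별로 신고한 사용자 Set를 저장하는 'report_dict' (HashMap<String, HashSet>)
--     # 유저별로 신고된 횟수를 저장하는 `cnt_dict` (HashMap<String, Integer>)
--     report_dict = defaultdict(set)
--     cnt_dict = defaultdict(int)
--
--     # 유저별로 신고한 사용자 저장 (Set이므로 한 유저가 여러 번 신고한 건에 대해서는 한 번만 적용)
--     for r in report:
--         reporter, reportee = r.split(' ')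
--         report_dict[reporter].add(reportee)
--
--     # 유저별로 신고된 횟수 계산
--     for reportees in report_dict.values():
--         for reportee in reportees:
--             cnt_dict[reportee] += 1
--
--     # id_list에 저장된 id 순서로, 신고한 유저에 대한 정지 처리 결과 메일을 받은 횟수를 answer에 저장
--     answer = []
--     for reporter in id_list:
--
--         report_cnt = 0
--         for reportee in report_dict[reporter]:
--             if cnt_dict[reportee] >= k:
--                 report_cnt += 1
--
--         answer.append(report_cnt)
--
--     return answer
-- ===== SOURCE B (Python) =====
-- def solution(id_list, report, k):
--     # ordered dedup of (reporter, reportee) edges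
--     edges = list(dict.fromkeys(tuple(r.split(' ')) for r in report))
--     cnt = {}
--     for rep, ree in edges:
--         cnt[ree] = cnt.get(ree, 0) + 1
--     tally = {}
--     for rep, ree in edges:
--         if cnt[ree] >= k:
--             tally[rep] = tally.get(rep, 0) + 1
--     return [tally.get(uid, 0) for uid in id_list]
-- ===== Notes on version B (the rewrite author's own statement) =====
-- stated objective: alternative
-- what changed: B replaces A's per-reporter reportee-sets and nested per-id counting scan by a single deduped (reporter,reportee) edge list scanned twice: once to count distinct reports per reportee, once to accumulate banned-mail credit into a reporter-keyed tally, read off with a default-0 lookup per id.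
import Mathlib
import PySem

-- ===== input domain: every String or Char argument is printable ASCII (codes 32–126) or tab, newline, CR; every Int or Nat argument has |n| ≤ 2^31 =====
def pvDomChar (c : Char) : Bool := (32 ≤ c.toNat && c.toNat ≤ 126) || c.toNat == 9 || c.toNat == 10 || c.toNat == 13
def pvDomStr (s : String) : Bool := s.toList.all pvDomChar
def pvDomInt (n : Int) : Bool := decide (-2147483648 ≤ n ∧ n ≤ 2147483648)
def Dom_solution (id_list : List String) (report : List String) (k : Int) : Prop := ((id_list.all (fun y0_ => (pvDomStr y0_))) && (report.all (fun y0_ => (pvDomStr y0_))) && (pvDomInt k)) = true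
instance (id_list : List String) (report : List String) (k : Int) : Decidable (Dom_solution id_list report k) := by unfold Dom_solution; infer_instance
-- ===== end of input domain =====

-- B replaces A's per-reporter reportee-sets plus a nested per-id scan by one deduped edge list
-- scanned twice into a reporter-keyed tally (objective: alternative decomposition, same cost).

-- shared parsing step: reporter, reportee = r.split(' ')  (exactly two pieces under Pre_)
def pvParse (r : String) : String × String :=
  let parts := (PySem.Str.split? r " ").getD []
  (parts.getD 0 "", parts.getD 1 "")

-- ===== PORT A =====
-- the defaultdict access report_dict[reporter] in A's answer loop may insert an empty set,
-- but that mutation never changes any later lookup, so the port reads with getD.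
def solution (id_list : List String) (report : List String) (k : Int) : List Int :=
  let report_dict : PySem.Dict String (PySem.Set String) :=
    report.foldl (fun d r =>
      d.modify (pvParse r).1 PySem.Set.empty (fun s => PySem.Set.add s (pvParse r).2))
      PySem.Dict.empty
  let cnt_dict : PySem.Dict String Int :=
    report_dict.values.foldl (fun c reportees =>
      reportees.foldl (fun c e => c.modify e 0 (· + 1)) c) PySem.Dict.empty
  id_list.foldl (fun answer reporter =>
    answer ++ [(report_dict.getD reporter PySem.Set.empty).foldl
      (fun acc e => if cnt_dict.getD e 0 ≥ k then acc + 1 else acc) 0]) []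

-- ===== PORT B =====
def solution_alt (id_list : List String) (report : List String) (k : Int) : List Int :=
  let edges : List (String × String) := PySem.List.dedup (report.map pvParse)
  let cnt : PySem.Dict String Int :=
    edges.foldl (fun c e => c.modify e.2 0 (· + 1)) PySem.Dict.empty
  let tally : PySem.Dict String Int :=
    edges.foldl (fun t e => if cnt.getD e.2 0 ≥ k then t.modify e.1 0 (· + 1) else t)
      PySem.Dict.empty
  id_list.map (fun uid => tally.getD uid 0)

-- ===== PRECONDITION & SPEC =====
-- Pre_ excludes report strings whose single-space split is not exactly two pieces:
-- there A's tuple unpacking 'reporter, reportee = r.split(' ')' raises ValueError.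
def Pre_solution (id_list : List String) (report : List String) (k : Int) : Prop :=
  ∀ r ∈ report, ((PySem.Str.split? r " ").getD []).length = 2
instance (id_list : List String) (report : List String) (k : Int) : Decidable (Pre_solution id_list report k) := by unfold Pre_solution; infer_instance

def pvWitness_solution : List String × List String × Int :=
  (["muzi", "frodo", "apeach", "neo"],
   ["muzi frodo", "apeach frodo", "frodo neo", "muzi neo", "apeach muzi", "muzi frodo"], 2)

def Spec_solution (id_list : List String) (report : List String) (k : Int) (out : List Int) : Prop := out = solution_alt id_list report k
instance (id_list : List String) (report : List String) (k : Int) (out : List Int) : Decidable (Spec_solution id_list report k out) := by unfold Spec_solution; infer_instance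

-- ===== CLAIM (what is proved, stated in full; the proofs are below) =====
def Claim_equal_solution : Prop := ∀ (id_list : List String) (report : List String) (k : Int), Dom_solution id_list report k → Pre_solution id_list report k → Spec_solution id_list report k (solution id_list report k)

-- ===== LEMMAS AND PROOFS =====

-- proof-only names for the two programs' intermediate values
def pvEdges (report : List String) : List (String × String) :=
  PySem.Set.ofList (report.map pvParse)

def pvRD (report : List String) : PySem.Dict String (PySem.Set String) :=
  report.foldl (fun d r =>
    d.modify (pvParse r).1 PySem.Set.empty (fun s => PySem.Set.add s (pvParse r).2))
    PySem.Dict.empty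

def pvCntA (report : List String) : PySem.Dict String Int :=
  (pvRD report).values.foldl (fun c reportees =>
    reportees.foldl (fun c e => c.modify e 0 (· + 1)) c) PySem.Dict.empty

def pvCntB (report : List String) : PySem.Dict String Int :=
  (pvEdges report).foldl (fun c e => c.modify e.2 0 (· + 1)) PySem.Dict.empty

-- the set of reportees a given reporter reported, in A's insertion order
def pvRepSet (report : List String) (rep : String) : PySem.Set String :=
  PySem.Set.ofList ((report.filter (fun r => (pvParse r).1 == rep)).map (fun r => (pvParse r).2))

-- A's first loop, looked up at any key
lemma pv_getD_report_dict (l : List String) (d : PySem.Dict String (PySem.Set String)) (rep : String) :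
    (l.foldl (fun d r =>
        d.modify (pvParse r).1 PySem.Set.empty (fun s => PySem.Set.add s (pvParse r).2)) d).getD
      rep PySem.Set.empty
    = PySem.Set.update (d.getD rep PySem.Set.empty)
        ((l.filter (fun r => (pvParse r).1 == rep)).map (fun r => (pvParse r).2)) := by
  induction l generalizing d with
  | nil => simp [PySem.Set.update]
  | cons r l ih =>
    simp only [List.foldl_cons, List.filter_cons, ih]
    by_cases h : (pvParse r).1 = rep
    · simp [h, PySem.Dict.getD_modify_self, PySem.Set.update_cons]
    · rw [PySem.Dict.getD_modify_of_ne _ _ _ (Ne.symm h)]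
      simp [h]

lemma pv_rd_getD (report : List String) (rep : String) :
    (pvRD report).getD rep PySem.Set.empty = pvRepSet report rep := by
  rw [pvRD, pv_getD_report_dict, PySem.Dict.getD_empty, PySem.Set.update_empty, pvRepSet]

lemma pv_keys (report : List String) :
    (pvRD report).keys = PySem.Set.ofList (report.map (fun r => (pvParse r).1)) := by
  rw [pvRD, PySem.Dict.keys_foldl_modify_key report (fun r => (pvParse r).1) PySem.Set.empty
    (fun _ r => fun s => PySem.Set.add s (pvParse r).2)]
  rw [PySem.Dict.keys_empty, PySem.Set.update_nil_left]

lemma pv_values (report : List String) :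
    (pvRD report).values
    = (PySem.Set.ofList (report.map (fun r => (pvParse r).1))).map (pvRepSet report) := by
  rw [PySem.Dict.values_eq_map_keys _ (by rw [pv_keys]; exact PySem.Set.nodup_ofList _) PySem.Set.empty,
    pv_keys]
  exact List.map_congr_left (fun k _ => pv_rd_getD report k)

lemma pv_mem_repSet (report : List String) (rep x : String) :
    x ∈ pvRepSet report rep ↔ (rep, x) ∈ report.map pvParse := by
  simp only [pvRepSet, PySem.Set.mem_ofList, List.mem_map, List.mem_filter, beq_iff_eq]
  constructor
  · rintro ⟨r, ⟨hr, h1⟩, h2⟩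
    exact ⟨r, hr, by rw [← h1, ← h2]⟩
  · rintro ⟨r, hr, h⟩
    exact ⟨r, ⟨hr, by rw [h]⟩, by rw [h]⟩

-- A's grouped edges, flattened with their keys, are a permutation of B's deduped edge list
lemma pv_perm_edges (report : List String) :
    ((PySem.Set.ofList (report.map (fun r => (pvParse r).1))).map
      (fun rep => (pvRepSet report rep).map (fun x => (rep, x)))).flatten.Perm
      (pvEdges report) := by
  apply (List.perm_ext_iff_of_nodup ?_ ?_).mpr
  · rintro ⟨a, b⟩
    constructor
    · intro h
      obtain ⟨piece, hpiece, hp⟩ := List.mem_flatten.mp h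
      obtain ⟨rep, hrep, rfl⟩ := List.mem_map.mp hpiece
      obtain ⟨x, hx, hxe⟩ := List.mem_map.mp hp
      rw [pvEdges, PySem.Set.mem_ofList, ← hxe]
      exact (pv_mem_repSet report rep x).mp hx
    · intro h
      rw [pvEdges, PySem.Set.mem_ofList] at h
      obtain ⟨r, hr, hpr⟩ := List.mem_map.mp h
      apply List.mem_flatten.mpr
      refine ⟨(pvRepSet report a).map (fun x => (a, x)), ?_, ?_⟩
      · apply List.mem_map_of_mem
        rw [PySem.Set.mem_ofList]
        exact List.mem_map.mpr ⟨r, hr, congrArg Prod.fst hpr⟩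
      · exact List.mem_map_of_mem ((pv_mem_repSet report a b).mpr h)
  · rw [List.nodup_flatten]
    constructor
    · intro piece hpiece
      obtain ⟨rep, hrep, rfl⟩ := List.mem_map.mp hpiece
      exact (PySem.Set.nodup_ofList _).map_on
        (fun x _ y _ hxy => (Prod.mk.injEq .. ▸ hxy : _ ∧ _).2)
    · rw [List.pairwise_map]
      apply (PySem.Set.nodup_ofList _).imp
      intro r1 r2 hne p hp1 hp2
      obtain ⟨x1, _, he1⟩ := List.mem_map.mp hp1
      obtain ⟨x2, _, he2⟩ := List.mem_map.mp hp2
      exact hne ((congrArg Prod.fst he1).trans (congrArg Prod.fst he2).symm)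
  · exact PySem.Set.nodup_ofList _

-- the two count dictionaries agree at every key
lemma pv_cnt_eq (report : List String) (e : String) :
    (pvCntA report).getD e 0 = (pvCntB report).getD e 0 := by
  rw [pvCntA, pvCntB, ← List.foldl_flatten, ← List.foldl_map (f := Prod.snd)
    (g := fun (c : PySem.Dict String Int) x => c.modify x 0 (· + 1)),
    PySem.Dict.getD_foldl_modify_add_one, PySem.Dict.getD_foldl_modify_add_one,
    PySem.Dict.getD_empty, pv_values]
  have h2 : (((PySem.Set.ofList (report.map (fun r => (pvParse r).1))).map
      (fun rep => (pvRepSet report rep).map (fun x => (rep, x)))).flatten).map Prod.snd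
      = ((PySem.Set.ofList (report.map (fun r => (pvParse r).1))).map (pvRepSet report)).flatten := by
    rw [List.map_flatten, List.map_map]
    congr 1
    exact List.map_congr_left (fun rep _ => by simp [List.map_map])
  rw [← h2, ((pv_perm_edges report).map Prod.snd).count_eq]

-- the reportees of a fixed reporter among B's edges are exactly A's set for that reporter
lemma pv_snd_perm (report : List String) (uid : String) :
    (((pvEdges report).filter (fun p => p.1 == uid)).map Prod.snd).Perm (pvRepSet report uid) := by
  apply (List.perm_ext_iff_of_nodup ?_ ?_).mpr
  · intro b
    simp only [List.mem_map, List.mem_filter, beq_iff_eq]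
    constructor
    · rintro ⟨p, ⟨hp, h1⟩, h2⟩
      apply (pv_mem_repSet report uid b).mpr
      rw [pvEdges, PySem.Set.mem_ofList] at hp
      have : p = (uid, b) := Prod.ext h1 h2
      rwa [this] at hp
    · intro hb
      refine ⟨(uid, b), ⟨?_, rfl⟩, rfl⟩
      rw [pvEdges, PySem.Set.mem_ofList]
      exact (pv_mem_repSet report uid b).mp hb
  · apply List.Nodup.map_on
    · rintro x hx y hy hxy
      rw [List.mem_filter, beq_iff_eq] at hx hy
      exact Prod.ext (hx.2.trans hy.2.symm) hxy
    · exact (PySem.Set.nodup_ofList _).filter _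
  · exact PySem.Set.nodup_ofList _

-- per-id entries agree
lemma pv_entry_eq (report : List String) (k : Int) (uid : String) :
    ((pvRD report).getD uid PySem.Set.empty).foldl
        (fun acc e => if (pvCntA report).getD e 0 ≥ k then acc + 1 else acc) (0 : Int)
    = ((pvEdges report).foldl
        (fun t p => if (pvCntB report).getD p.2 0 ≥ k then t.modify p.1 0 (· + 1) else t)
        PySem.Dict.empty).getD uid 0 := by
  rw [pv_rd_getD,
    PySem.List.foldl_ite_add_one (fun e => (pvCntA report).getD e 0 ≥ k),
    PySem.List.foldl_ite_eq_foldl_filter (fun p : String × String => (pvCntB report).getD p.2 0 ≥ k),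
    ← List.foldl_map (f := Prod.fst)
      (g := fun (t : PySem.Dict String Int) x => t.modify x 0 (· + 1)),
    PySem.Dict.getD_foldl_modify_add_one, PySem.Dict.getD_empty]
  have hcount : List.count uid (((pvEdges report).filter
      (fun p => decide ((pvCntB report).getD p.2 0 ≥ k))).map Prod.fst)
      = List.countP (fun p => p.1 == uid)
        ((pvEdges report).filter (fun p => decide ((pvCntB report).getD p.2 0 ≥ k))) := by
    rw [List.count, List.countP_map]
    rfl
  rw [hcount, List.countP_filter]
  have hswap : List.countP
      (fun p => p.1 == uid && decide ((pvCntB report).getD p.2 0 ≥ k)) (pvEdges report)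
      = List.countP (fun p => decide ((pvCntB report).getD p.2 0 ≥ k))
          ((pvEdges report).filter (fun p => p.1 == uid)) := by
    rw [List.countP_filter]
    exact List.countP_congr (fun p _ => by rw [Bool.and_comm])
  have h3 : List.countP (fun p => decide ((pvCntB report).getD p.2 0 ≥ k))
      ((pvEdges report).filter (fun p => p.1 == uid))
      = List.countP (fun e => decide ((pvCntB report).getD e 0 ≥ k))
          (((pvEdges report).filter (fun p => p.1 == uid)).map Prod.snd) :=
    (List.countP_map (p := fun e => decide ((pvCntB report).getD e 0 ≥ k))
      (f := Prod.snd)).symm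
  rw [hswap, h3, (pv_snd_perm report uid).countP_eq]
  have h4 : List.countP (fun e => decide ((pvCntA report).getD e 0 ≥ k)) (pvRepSet report uid)
      = List.countP (fun e => decide ((pvCntB report).getD e 0 ≥ k)) (pvRepSet report uid) :=
    List.countP_congr (fun e _ => by rw [pv_cnt_eq])
  rw [h4]

-- ===== VERDICT (by name: the statement is the Claim_ definition above) =====
theorem solution_spec : Claim_equal_solution := by
  intro id_list report k _ _
  unfold Spec_solution solution solution_alt
  simp only [PySem.List.dedup_eq_ofList, PySem.List.foldl_append_singleton_eq_map, List.nil_append]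
  exact List.map_congr_left (fun uid _ => pv_entry_eq report k uid)
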